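-- pv_equiv track=rewrite | github.com/alaiasolkobreslin/bril | examples/l4.py | get_preds_cfg
-- ===== SOURCE A (Python) =====
-- def get_preds_cfg(cfg):
--     preds = {}
--     for name in cfg:
--         preds[name] = set()
--     for name in cfg:
--         for (n, (succ, _, _)) in cfg.items():
--             if name in succ:
--                 preds[name].add(n)
--     return preds
-- ===== SOURCE B (Python) =====
-- def get_preds_cfg(cfg):
--     incoming = {}
--     for n, (succ, _, _) in cfg.items():
--         for s in succ:
--             lst = incoming.get(s, [])
--             if n not in lst:
--                 incoming[s] = lst + [n]
--     return {name: set(incoming.get(name, [])) for name in cfg}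
-- ===== Notes on version B (the rewrite author's own statement) =====
-- stated objective: faster
-- what changed: Instead of scanning the whole CFG once per node (nested full passes), B makes one pass over the edges, grouping each node under each of its successors in an 'incoming' map, and then reads the result off per key.
import Mathlib
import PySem

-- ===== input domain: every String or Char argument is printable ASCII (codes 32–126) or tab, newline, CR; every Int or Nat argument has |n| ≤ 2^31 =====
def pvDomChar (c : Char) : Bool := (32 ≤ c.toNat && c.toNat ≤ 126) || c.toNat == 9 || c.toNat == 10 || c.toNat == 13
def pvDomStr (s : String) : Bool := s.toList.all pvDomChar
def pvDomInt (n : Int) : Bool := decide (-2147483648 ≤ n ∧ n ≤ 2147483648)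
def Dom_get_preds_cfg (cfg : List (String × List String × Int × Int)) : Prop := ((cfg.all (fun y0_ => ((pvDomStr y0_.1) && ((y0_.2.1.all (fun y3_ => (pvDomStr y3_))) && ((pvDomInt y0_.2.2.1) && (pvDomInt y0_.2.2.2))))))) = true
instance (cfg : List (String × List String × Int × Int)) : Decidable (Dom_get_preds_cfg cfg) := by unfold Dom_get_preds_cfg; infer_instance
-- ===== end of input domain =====

-- B replaces A's per-node scan of the whole CFG by one pass over the edges that groups each
-- node under each of its successors in an 'incoming' map, read off per key (objective: faster).

-- ===== PORT A =====
-- A: init preds[name] = set() for every key; then for every key `name`, scan ALL cfg items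
-- and add n to preds[name] whenever name is in n's successor list.
def get_preds_cfg (cfg : List (String × List String × Int × Int)) : List (String × List String) :=
  let d := PySem.Dict.ofList cfg
  let preds : PySem.Dict String (List String) :=
    d.keys.foldl (fun p name => p.insert name []) PySem.Dict.empty
  let preds :=
    d.keys.foldl (fun p name =>
      d.items.foldl (fun p it =>
        if name ∈ it.2.1 then p.modify name [] (fun s => PySem.Set.add s it.1) else p) p) preds
  preds.items

-- ===== PORT B =====
-- B: one pass over the edges building incoming[s] = list of nodes with successor s (no
-- pre-initialisation, keys appear on demand), then a dict comprehension over the cfg keys.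
def get_preds_cfg_alt (cfg : List (String × List String × Int × Int)) : List (String × List String) :=
  let d := PySem.Dict.ofList cfg
  let incoming : PySem.Dict String (List String) :=
    d.items.foldl (fun inc it =>
      it.2.1.foldl (fun inc s =>
        let lst := inc.getD s []
        if it.1 ∈ lst then inc else inc.insert s (lst ++ [it.1])) inc) PySem.Dict.empty
  d.keys.map (fun name => (name, PySem.Set.ofList (incoming.getD name [])))

-- ===== PRECONDITION & SPEC =====
def Spec_get_preds_cfg (cfg : List (String × List String × Int × Int)) (out : List (String × List String)) : Prop := out = get_preds_cfg_alt cfg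
instance (cfg : List (String × List String × Int × Int)) (out : List (String × List String)) : Decidable (Spec_get_preds_cfg cfg out) := by unfold Spec_get_preds_cfg; infer_instance

-- ===== CLAIM (what is proved, stated in full; the proofs are below) =====
def Claim_equal_get_preds_cfg : Prop := ∀ (cfg : List (String × List String × Int × Int)), Dom_get_preds_cfg cfg → Spec_get_preds_cfg cfg (get_preds_cfg cfg)

-- ===== LEMMAS AND PROOFS =====

-- the value A computes for key k: fold over the items, adding it.1 whenever k ∈ it.2.1
def pvG (k : String) (l : List (String × List String × Int × Int)) (s : List String) : List String :=
  l.foldl (fun s it => if k ∈ it.2.1 then PySem.Set.add s it.1 else s) s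

theorem pvG_nodup (k : String) (l : List (String × List String × Int × Int))
    (s : List String) (h : s.Nodup) : (pvG k l s).Nodup := by
  induction l generalizing s with
  | nil => exact h
  | cons it rest ih =>
      simp only [pvG, List.foldl_cons]
      by_cases hm : k ∈ it.2.1
      · rw [if_pos hm]; exact ih _ (PySem.Set.nodup_add _ _ h)
      · rw [if_neg hm]; exact ih _ h

-- initialisation: every key's value starts as []
theorem pv_init_getD (N : List String) (p : PySem.Dict String (List String)) (k : String)
    (h : p.getD k [] = []) :
    (N.foldl (fun p name => p.insert name []) p).getD k [] = [] := by
  induction N generalizing p with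
  | nil => exact h
  | cons n rest ih =>
      refine ih _ ?_
      rw [PySem.Dict.getD_insert]
      split <;> simp [h]

-- A's inner loop: only key `name` changes, and it changes by pvG
theorem pv_innerA_getD (k name : String) (l : List (String × List String × Int × Int))
    (p : PySem.Dict String (List String)) :
    (l.foldl (fun p it =>
        if name ∈ it.2.1 then p.modify name [] (fun s => PySem.Set.add s it.1) else p) p).getD k []
      = if k = name then pvG k l (p.getD k []) else p.getD k [] := by
  induction l generalizing p with
  | nil => simp [pvG]
  | cons it rest ih =>
      simp only [List.foldl_cons]
      by_cases hm : name ∈ it.2.1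
      · rw [if_pos hm, ih, PySem.Dict.getD_modify]
        by_cases hk : k = name
        · subst hk; simp [pvG, hm]
        · simp [hk]
      · rw [if_neg hm, ih]
        by_cases hk : k = name
        · subst hk; simp [pvG, hm]
        · simp [hk]

-- A's inner loop preserves the key set when `name` is already a key
theorem pv_innerA_keys (name : String) (l : List (String × List String × Int × Int))
    (p : PySem.Dict String (List String)) (h : name ∈ p.keys) :
    (l.foldl (fun p it =>
        if name ∈ it.2.1 then p.modify name [] (fun s => PySem.Set.add s it.1) else p) p).keys
      = p.keys := by
  induction l generalizing p with
  | nil => rfl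
  | cons it rest ih =>
      simp only [List.foldl_cons]
      by_cases hm : name ∈ it.2.1
      · rw [if_pos hm]
        have hc : p.contains name = true := (PySem.Dict.contains_iff_mem_keys p name).mpr h
        have hkeys : (p.modify name [] (fun s => PySem.Set.add s it.1)).keys = p.keys := by
          rw [PySem.Dict.keys_modify, PySem.Dict.keys_insert_of_contains _ _ hc]
        rw [ih _ (by rw [hkeys]; exact h), hkeys]
      · rw [if_neg hm]
        exact ih p h

-- A's outer loop, seen at one key k
theorem pv_outerA_getD (k : String) (items : List (String × List String × Int × Int))
    (N : List String) (p : PySem.Dict String (List String))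
    (hnd : N.Nodup) (hmem : ∀ n ∈ N, n ∈ p.keys) :
    (N.foldl (fun p name =>
        items.foldl (fun p it =>
          if name ∈ it.2.1 then p.modify name [] (fun s => PySem.Set.add s it.1) else p) p) p).getD k []
      = if k ∈ N then pvG k items (p.getD k []) else p.getD k [] := by
  induction N generalizing p with
  | nil => simp
  | cons n rest ih =>
      simp only [List.foldl_cons]
      have hkeys := pv_innerA_keys n items p (hmem n (by simp))
      have hrest : ∀ m ∈ rest, m ∈ (items.foldl (fun p it =>
          if n ∈ it.2.1 then p.modify n [] (fun s => PySem.Set.add s it.1) else p) p).keys := by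
        intro m hm; rw [hkeys]; exact hmem m (by simp [hm])
      rw [ih _ hnd.of_cons hrest, pv_innerA_getD]
      by_cases hk : k = n
      · subst hk
        have : k ∉ rest := (List.nodup_cons.mp hnd).1
        simp [this]
      · simp [hk, List.mem_cons]

theorem pv_outerA_keys (items : List (String × List String × Int × Int))
    (N : List String) (p : PySem.Dict String (List String)) (hmem : ∀ n ∈ N, n ∈ p.keys) :
    (N.foldl (fun p name =>
        items.foldl (fun p it =>
          if name ∈ it.2.1 then p.modify name [] (fun s => PySem.Set.add s it.1) else p) p) p).keys
      = p.keys := by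
  induction N generalizing p with
  | nil => rfl
  | cons n rest ih =>
      simp only [List.foldl_cons]
      have hkeys := pv_innerA_keys n items p (hmem n (by simp))
      rw [ih _ (by intro m hm; rw [hkeys]; exact hmem m (by simp [hm])), hkeys]

-- initial dict: keys are exactly the cfg keys
theorem pv_init_keys (N : List String) (hnd : N.Nodup) :
    ((N.foldl (fun p name => p.insert name []) (PySem.Dict.empty : PySem.Dict String (List String)))).keys = N := by
  have := PySem.Dict.keys_foldl_insert (ν := List String) N (fun _ _ => []) PySem.Dict.empty
  rw [this, PySem.Dict.keys_empty]
  rw [show (PySem.Set.update ([] : List String) N) = PySem.Set.ofList N from rfl]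
  exact PySem.Set.ofList_eq_self_of_nodup N hnd

-- B's inner loop (over one successor list), seen at one key k: one set-insertion of n
theorem pv_innerB_getD (k n : String) (succ : List String)
    (inc : PySem.Dict String (List String)) :
    (succ.foldl (fun inc s =>
        let lst := inc.getD s []
        if n ∈ lst then inc else inc.insert s (lst ++ [n])) inc).getD k []
      = if k ∈ succ then PySem.Set.add (inc.getD k []) n else inc.getD k [] := by
  induction succ generalizing inc with
  | nil => simp
  | cons s rest ih =>
      simp only [List.foldl_cons]
      by_cases hmem : n ∈ inc.getD s []
      · simp only [if_pos hmem]
        rw [ih]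
        by_cases hk : k = s
        · subst hk
          have hadd : PySem.Set.add (inc.getD k []) n = inc.getD k [] := by
            simp [PySem.Set.add, hmem]
          by_cases hr : k ∈ rest <;> simp [hr, hadd]
        · by_cases hr : k ∈ rest <;> simp [hk, hr]
      · simp only [if_neg hmem]
        rw [ih, PySem.Dict.getD_insert]
        by_cases hk : k = s
        · subst hk
          have hadd : PySem.Set.add (inc.getD k []) n = inc.getD k [] ++ [n] := by
            simp [PySem.Set.add, hmem]
          by_cases hr : k ∈ rest <;> simp [hr, hadd]
        · by_cases hr : k ∈ rest <;> simp [hk, hr]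

-- B's pass over the items, seen at one key k: exactly pvG
theorem pv_outerB_getD (k : String) (l : List (String × List String × Int × Int))
    (inc : PySem.Dict String (List String)) :
    (l.foldl (fun inc it =>
        it.2.1.foldl (fun inc s =>
          let lst := inc.getD s []
          if it.1 ∈ lst then inc else inc.insert s (lst ++ [it.1])) inc) inc).getD k []
      = pvG k l (inc.getD k []) := by
  induction l generalizing inc with
  | nil => simp [pvG]
  | cons it rest ih =>
      simp only [List.foldl_cons]
      rw [ih, pv_innerB_getD]
      simp only [pvG, List.foldl_cons]

-- ===== VERDICT (by name: the statement is the Claim_ definition above) =====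
theorem get_preds_cfg_spec : Claim_equal_get_preds_cfg := by
  intro cfg _
  unfold Spec_get_preds_cfg get_preds_cfg get_preds_cfg_alt
  simp only []
  set d := PySem.Dict.ofList cfg with hd
  have hK : d.keys.Nodup := PySem.Dict.nodup_keys_ofList cfg
  set p0 : PySem.Dict String (List String) :=
    d.keys.foldl (fun p name => p.insert name []) PySem.Dict.empty with hp0
  have hkeys0 : p0.keys = d.keys := pv_init_keys d.keys hK
  have hgetD0 : ∀ k, p0.getD k [] = [] := fun k =>
    pv_init_getD d.keys PySem.Dict.empty k (by rw [PySem.Dict.getD_empty])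
  have hmem0 : ∀ n ∈ d.keys, n ∈ p0.keys := fun n hn => by rw [hkeys0]; exact hn
  set pA := d.keys.foldl (fun p name =>
      d.items.foldl (fun p it =>
        if name ∈ it.2.1 then p.modify name [] (fun s => PySem.Set.add s it.1) else p) p) p0 with hpA
  set inc := d.items.foldl (fun inc it =>
      it.2.1.foldl (fun inc s =>
        let lst := inc.getD s []
        if it.1 ∈ lst then inc else inc.insert s (lst ++ [it.1])) inc)
      (PySem.Dict.empty : PySem.Dict String (List String)) with hinc
  have hkA : pA.keys = d.keys := by rw [hpA, pv_outerA_keys _ _ _ hmem0, hkeys0]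
  have hAv : ∀ k ∈ d.keys, pA.getD k [] = pvG k d.items [] := by
    intro k hk
    rw [hpA, pv_outerA_getD k d.items d.keys p0 hK hmem0, if_pos hk, hgetD0]
  have hBv : ∀ k, inc.getD k [] = pvG k d.items [] := by
    intro k
    rw [hinc, pv_outerB_getD, PySem.Dict.getD_empty]
  rw [PySem.Dict.items_eq_map_keys pA (by rw [hkA]; exact hK) [], hkA]
  refine List.map_congr_left (fun k hk => ?_)
  rw [hAv k hk, hBv k,
      PySem.Set.ofList_eq_self_of_nodup _ (pvG_nodup k d.items [] List.nodup_nil)]
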